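-- pv_equiv track=rewrite | github.com/993007429/stone | stone/libs/algorithms/TCTAnalysis_v3_1/src/utils.py | generate_colors
-- ===== SOURCE A (Python) =====
-- def generate_colors(i, bgr=False):
--     hex = ('FF3838', 'FF9D97', 'FF701F', 'FFB21D', 'CFD231', '48F90A', '92CC17', '3DDB86', '1A9334', '00D4BB',
--            '2C99A8', '00C2FF', '344593', '6473FF', '0018EC', '8438FF', '520085', 'CB38FF', 'FF95C8', 'FF37C7')
--     palette = []
--     for iter in hex:
--         h = '#' + iter
--         palette.append(tuple(int(h[1 + i:1 + i + 2], 16) for i in (0, 2, 4)))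
--     num = len(palette)
--     color = palette[int(i) % num]
--     return (color[2], color[1], color[0]) if bgr else color
-- ===== SOURCE B (Python) =====
-- def generate_colors(i, bgr=False):
--     hex = ('FF3838', 'FF9D97', 'FF701F', 'FFB21D', 'CFD231', '48F90A', '92CC17', '3DDB86', '1A9334', '00D4BB',
--            '2C99A8', '00C2FF', '344593', '6473FF', '0018EC', '8438FF', '520085', 'CB38FF', 'FF95C8', 'FF37C7')
--     h = hex[int(i) % len(hex)]
--     color = tuple(int(h[k:k + 2], 16) for k in (0, 2, 4))
--     return color[::-1] if bgr else color
-- ===== Notes on version B (the rewrite author's own statement) =====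
-- stated objective: simpler
-- what changed: B drops A's palette-building loop entirely: it indexes the hex tuple directly with i % 20 and parses only that single selected string, reversing the tuple with a slice for BGR.
import Mathlib
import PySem

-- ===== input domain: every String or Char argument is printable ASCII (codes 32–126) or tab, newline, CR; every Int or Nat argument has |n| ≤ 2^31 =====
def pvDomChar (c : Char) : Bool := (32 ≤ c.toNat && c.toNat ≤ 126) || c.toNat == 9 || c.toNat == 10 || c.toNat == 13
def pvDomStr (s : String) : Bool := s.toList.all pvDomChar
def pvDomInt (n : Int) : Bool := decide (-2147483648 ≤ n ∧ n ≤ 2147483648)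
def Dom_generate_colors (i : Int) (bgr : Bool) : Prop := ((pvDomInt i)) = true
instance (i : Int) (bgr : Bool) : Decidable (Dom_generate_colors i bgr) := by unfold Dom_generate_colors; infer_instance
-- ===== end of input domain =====

-- B avoids A's 20-entry palette-building loop: it selects the single hex string at
-- index i % 20 and parses only that one, reversing the tuple by a slice for bgr.

-- shared literal: the hex tuple both Pythons carry
def pvHex : List String :=
  ["FF3838", "FF9D97", "FF701F", "FFB21D", "CFD231", "48F90A", "92CC17", "3DDB86", "1A9334", "00D4BB",
   "2C99A8", "00C2FF", "344593", "6473FF", "0018EC", "8438FF", "520085", "CB38FF", "FF95C8", "FF37C7"]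

-- ===== PORT A =====
-- int(h[1+k:1+k+2], 16); for A's literal hex strings this never raises, so .getD 0 is never the case taken
def pvParseA (h : List Char) (k : Int) : Int :=
  (PySem.Int.ofCharsBase? (PySem.List.slice h (some (1 + k)) (some (1 + k + 2))) 16).getD 0

def generate_colors (i : Int) (bgr : Bool) : Int × Int × Int :=
  let palette : List (Int × Int × Int) :=
    pvHex.foldl (fun acc iter =>
      let h := '#' :: iter.toList
      acc ++ [(pvParseA h 0, pvParseA h 2, pvParseA h 4)]) []
  let num : Int := palette.length
  -- palette[int(i) % num]: the index is always in range (num = 20 > 0), so getD's default is never taken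
  let color := (PySem.List.pyGet? palette (PySem.Int.mod i num)).getD (0, 0, 0)
  if bgr then (color.2.2, color.2.1, color.1) else color

-- ===== PORT B =====
-- int(h[k:k+2], 16); never raises on these literal hex strings
def pvParseB (h : List Char) (k : Int) : Int :=
  (PySem.Int.ofCharsBase? (PySem.List.slice h (some k) (some (k + 2))) 16).getD 0

def generate_colors_alt (i : Int) (bgr : Bool) : Int × Int × Int :=
  -- hex[int(i) % len(hex)]: index always in range, getD's default never taken
  let h := ((PySem.List.pyGet? pvHex (PySem.Int.mod i (pvHex.length : Int))).getD "").toList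
  let color := (pvParseB h 0, pvParseB h 2, pvParseB h 4)
  -- color[::-1] on a 3-tuple: the reversed triple
  if bgr then (color.2.2, color.2.1, color.1) else color

-- ===== PRECONDITION & SPEC =====
def Spec_generate_colors (i : Int) (bgr : Bool) (out : Int × Int × Int) : Prop := out = generate_colors_alt i bgr
instance (i : Int) (bgr : Bool) (out : Int × Int × Int) : Decidable (Spec_generate_colors i bgr out) := by unfold Spec_generate_colors; infer_instance

-- ===== CLAIM (what is proved, stated in full; the proofs are below) =====
def Claim_equal_generate_colors : Prop := ∀ (i : Int) (bgr : Bool), Dom_generate_colors i bgr → Spec_generate_colors i bgr (generate_colors i bgr)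

-- ===== LEMMAS AND PROOFS =====

-- the value of A's closed palette-building foldl, checked by the kernel
def pvPaletteA : List (Int × Int × Int) :=
  [(255, 56, 56), (255, 157, 151), (255, 112, 31), (255, 178, 29), (207, 210, 49), (72, 249, 10), (146, 204, 23),
   (61, 219, 134), (26, 147, 52), (0, 212, 187), (44, 153, 168), (0, 194, 255), (52, 69, 147), (100, 115, 255),
   (0, 24, 236), (132, 56, 255), (82, 0, 133), (203, 56, 255), (255, 149, 200), (255, 55, 199)]

theorem palette_eval :
    List.foldl (fun acc iter =>
      acc ++ [(pvParseA ('#' :: iter.toList) 0, pvParseA ('#' :: iter.toList) 2,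
               pvParseA ('#' :: iter.toList) 4)]) [] pvHex = pvPaletteA := by
  decide

theorem len_pal : ((pvPaletteA.length : Nat) : Int) = 20 := by decide

theorem len_hex : ((pvHex.length : Nat) : Int) = 20 := by decide

-- Python's i % 20 for the positive literal divisor is Lean's emod
theorem pvMod20 (i : Int) : PySem.Int.mod i 20 = i % 20 := by
  simp [pysem]

set_option maxHeartbeats 1000000 in
theorem generate_colors_spec : Claim_equal_generate_colors := by
  intro i bgr _
  unfold Spec_generate_colors generate_colors generate_colors_alt
  simp only [palette_eval, len_pal, len_hex, pvMod20]
  obtain ⟨r, hr, hre⟩ : ∃ r : Nat, r < 20 ∧ i % 20 = (r : Int) :=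
    ⟨(i % 20).toNat, by omega, by omega⟩
  rw [hre]
  interval_cases r <;> cases bgr <;> decide
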